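-- pv_equiv track=rewrite | github.com/ericjohney/adventofcode-2019 | day01/index.py | part2
-- ===== SOURCE A (Python) =====
-- from typing import List
-- import math
--
-- def compute_fuel(mass: int) -> int:
--     return max(math.floor(mass / 3) - 2, 0)
--
-- def part2(masses: List[int]) -> int:
--     sum = 0
--     for mass in masses:
--         fuel = compute_fuel(mass)
--         while fuel > 0:
--             sum += fuel
--             fuel = compute_fuel(fuel)
--     return sum
-- ===== SOURCE B (Python) =====
-- from typing import List
-- import math
--
-- def compute_fuel(mass: int) -> int:
--     return max(math.floor(mass / 3) - 2, 0)
--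
-- def total_fuel(mass: int) -> int:
--     f = compute_fuel(mass)
--     if f <= 0:
--         return 0
--     return f + total_fuel(f)
--
-- def part2(masses: List[int]) -> int:
--     return sum(total_fuel(m) for m in masses)
-- ===== Notes on version B (the rewrite author's own statement) =====
-- stated objective: simpler
-- what changed: Replaces the explicit while-loop with running accumulator by a recursive total_fuel helper over the self-similar fuel chain, summed with a generator expression.
import Mathlib
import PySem

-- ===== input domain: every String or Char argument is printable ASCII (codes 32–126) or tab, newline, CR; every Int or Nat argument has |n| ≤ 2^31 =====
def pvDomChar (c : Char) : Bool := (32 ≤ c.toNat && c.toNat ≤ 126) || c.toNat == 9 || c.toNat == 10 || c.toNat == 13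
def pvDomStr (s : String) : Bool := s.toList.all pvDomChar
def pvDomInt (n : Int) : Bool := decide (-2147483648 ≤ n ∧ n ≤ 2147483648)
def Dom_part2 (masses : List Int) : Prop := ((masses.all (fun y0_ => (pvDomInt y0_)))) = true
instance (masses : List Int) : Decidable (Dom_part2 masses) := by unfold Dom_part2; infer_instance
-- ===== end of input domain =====

-- B replaces A's explicit while-loop accumulation by a recursive total_fuel helper summed per mass (objective: simpler).


-- ===== PORT A =====
-- math.floor(mass / 3): exact as integer floor division for |mass| ≤ 2^31 (float error far below 1/3)
def computeFuel (mass : Int) : Int := max (PySem.Int.floordiv mass 3 - 2) 0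

theorem computeFuel_lt (f : Int) (h : 0 < f) : (computeFuel f).toNat < f.toNat := by
  have h3 : (0:Int) < 3 := by norm_num
  have := PySem.Int.floordiv_lt_iff_lt_mul (a := f) (b := 3) (q := f) h3
  have hlt : PySem.Int.floordiv f 3 < f := this.mpr (by nlinarith)
  simp only [computeFuel]
  omega

-- the while loop 'while fuel > 0: sum += fuel; fuel = compute_fuel(fuel)'
def whileLoop (fuel acc : Int) : Int :=
  if h : fuel > 0 then whileLoop (computeFuel fuel) (acc + fuel) else acc
termination_by fuel.toNat
decreasing_by exact computeFuel_lt fuel h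

def part2 (masses : List Int) : Int :=
  masses.foldl (fun s mass => whileLoop (computeFuel mass) s) 0

-- ===== PORT B =====
def totalFuel (mass : Int) : Int :=
  let f := computeFuel mass
  if h : f ≤ 0 then 0 else f + totalFuel f
termination_by (computeFuel mass).toNat
decreasing_by exact computeFuel_lt (computeFuel mass) (by omega)

def part2_alt (masses : List Int) : Int := (masses.map totalFuel).sum

-- ===== PRECONDITION & SPEC =====
def Spec_part2 (masses : List Int) (out : Int) : Prop := out = part2_alt masses
instance (masses : List Int) (out : Int) : Decidable (Spec_part2 masses out) := by unfold Spec_part2; infer_instance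

-- ===== CLAIM (what is proved, stated in full; the proofs are below) =====
def Claim_equal_part2 : Prop := ∀ (masses : List Int), Dom_part2 masses → Spec_part2 masses (part2 masses)

-- ===== LEMMAS AND PROOFS =====
theorem whileLoop_eq (n : Nat) : ∀ (f acc : Int), f.toNat ≤ n →
    whileLoop f acc = acc + (if f ≤ 0 then 0 else f + totalFuel f) := by
  induction n with
  | zero =>
    intro f acc hf
    rw [whileLoop]
    have : ¬ f > 0 := by omega
    simp [this, show f ≤ 0 by omega]
  | succ n ih =>
    intro f acc hf
    rw [whileLoop]
    by_cases h : f > 0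
    · have hlt := computeFuel_lt f h
      rw [dif_pos h, ih (computeFuel f) (acc + f) (by omega)]
      rw [if_neg (by omega : ¬ f ≤ 0)]
      conv_rhs => rw [totalFuel]
      by_cases hg : computeFuel f ≤ 0
      · simp only [hg, if_pos, dif_pos]; ring
      · simp only [hg, if_neg, dif_neg, not_false_iff]; ring
    · simp [h, show f ≤ 0 by omega]

theorem whileLoop_totalFuel (m acc : Int) :
    whileLoop (computeFuel m) acc = acc + totalFuel m := by
  rw [whileLoop_eq (computeFuel m).toNat (computeFuel m) acc le_rfl]
  conv_rhs => rw [totalFuel]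
  by_cases h : computeFuel m ≤ 0
  · simp only [h, if_pos, dif_pos]
  · simp only [h, if_neg, dif_neg, not_false_iff]

theorem foldl_eq_sum (masses : List Int) : ∀ (acc : Int),
    masses.foldl (fun s mass => whileLoop (computeFuel mass) s) acc
      = acc + (masses.map totalFuel).sum := by
  induction masses with
  | nil => intro acc; simp
  | cons m ms ih =>
    intro acc
    rw [List.foldl_cons, whileLoop_totalFuel, ih, List.map_cons, List.sum_cons]
    ring

-- ===== VERDICT (by name: the statement is the Claim_ definition above) =====
theorem part2_spec : Claim_equal_part2 := by
  intro masses _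
  show part2 masses = part2_alt masses
  simp [part2, part2_alt, foldl_eq_sum]
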